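-- pv_equiv track=rewrite | github.com/vaishnavipawar09/Applied-Algorithms | Assignment 8/Assignment8_AA_VP.py | find_order_size
-- ===== SOURCE A (Python) =====
-- def find_order_size(orders):
--
--     orderTracker = set()
--     symPairs = 0
--
--     for orderlist in orders:
--         [v, w] = orderlist
--         if (w, v) in orderTracker:
--             orderTracker.remove((w, v))
--             orderTracker.add((v, w))
--             symPairs += 1
--         else:
--             orderTracker.add((v, w))
--
--     ResultSize = len(orders) - symPairs
--
--     return ResultSize
-- ===== SOURCE B (Python) =====
-- def find_order_size(orders):
--     # Group-by-unordered-pair, then count consecutive orientation reversals per group.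
--     groups = {}
--     for orderlist in orders:
--         [v, w] = orderlist
--         groups.setdefault(frozenset((v, w)), []).append((v, w))
--     sym = 0
--     for tuples in groups.values():
--         prev = None
--         for (v, w) in tuples:
--             if prev == (w, v):
--                 sym += 1
--             prev = (v, w)
--     return len(orders) - sym
-- ===== Notes on version B (the rewrite author's own statement) =====
-- stated objective: alternative
-- what changed: Replaces the single-pass toggling set of oriented tuples by a group-by-unordered-pair dictionary followed by a per-group scan that counts consecutive orientation reversals.
import Mathlib
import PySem

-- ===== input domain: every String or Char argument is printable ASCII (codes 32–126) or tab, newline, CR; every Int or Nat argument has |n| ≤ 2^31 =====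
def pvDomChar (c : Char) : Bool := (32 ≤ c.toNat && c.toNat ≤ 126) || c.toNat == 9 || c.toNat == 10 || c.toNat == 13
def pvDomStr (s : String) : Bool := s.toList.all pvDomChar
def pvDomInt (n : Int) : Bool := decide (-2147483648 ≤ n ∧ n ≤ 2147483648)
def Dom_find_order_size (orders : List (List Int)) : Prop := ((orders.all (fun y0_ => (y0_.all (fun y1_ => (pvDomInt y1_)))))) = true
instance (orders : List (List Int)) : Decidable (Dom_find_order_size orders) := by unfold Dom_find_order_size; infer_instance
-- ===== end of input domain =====

-- B replaces A's toggling set of oriented tuples by a group-by-unordered-pair dict plus a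
-- per-group scan for consecutive orientation reversals; same cost, different decomposition.

-- ===== PORT A =====
def find_order_size (orders : List (List Int)) : Int :=
  let st := orders.foldl
    (fun (st : PySem.Set (Int × Int) × Int) orderlist =>
      match orderlist with
      | [v, w] =>
        if PySem.Set.contains st.1 (w, v) then
          -- 'remove' cannot raise here: it is guarded by the contains test, so it is 'discard'
          (PySem.Set.add (PySem.Set.discard st.1 (w, v)) (v, w), st.2 + 1)
        else
          (PySem.Set.add st.1 (v, w), st.2)
      | _ => st)   -- unreachable under Pre_ (Python raises ValueError on '[v, w] = orderlist')
    (PySem.Set.empty, 0)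
  (orders.length : Int) - st.2

-- ===== PORT B =====
-- frozenset((v, w)) of two ints, modelled exactly by the sorted pair: two such frozensets
-- are equal iff the sorted pairs are equal
def pvKey (v w : Int) : Int × Int := (min v w, max v w)

-- the inner 'prev = None; for (v, w) in tuples: …' loop of Source B
def pvGroupScan : Option (Int × Int) → List (Int × Int) → Int
  | _, [] => 0
  | prev, (v, w) :: rest =>
    (if prev = some (w, v) then 1 else 0) + pvGroupScan (some (v, w)) rest

-- the body of Source B's grouping loop: '[v, w] = orderlist; groups.setdefault(key, []).append((v, w))'
def pvGroupStep (g : PySem.Dict (Int × Int) (List (Int × Int))) (orderlist : List Int) :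
    PySem.Dict (Int × Int) (List (Int × Int)) :=
  match orderlist with
  | [v, w] => g.modify (pvKey v w) [] (· ++ [(v, w)])
  | [] => g        -- unreachable under Pre_ (Python raises ValueError)
  | [_] => g       -- unreachable under Pre_
  | _ :: _ :: _ :: _ => g   -- unreachable under Pre_

def find_order_size_alt (orders : List (List Int)) : Int :=
  let groups : PySem.Dict (Int × Int) (List (Int × Int)) :=
    orders.foldl pvGroupStep PySem.Dict.empty
  let sym := groups.values.foldl (fun acc ts => acc + pvGroupScan none ts) 0
  (orders.length : Int) - sym

-- ===== PRECONDITION & SPEC =====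
-- Pre_ excludes exactly the inputs where Python's '[v, w] = orderlist' raises ValueError (both A and B raise there)
def Pre_find_order_size (orders : List (List Int)) : Prop := ∀ l ∈ orders, l.length = 2
instance (orders : List (List Int)) : Decidable (Pre_find_order_size orders) := by unfold Pre_find_order_size; infer_instance
def pvWitness_find_order_size : List (List Int) := [[1, 2], [2, 1], [3, 3], [3, 3]]

def Spec_find_order_size (orders : List (List Int)) (out : Int) : Prop := out = find_order_size_alt orders
instance (orders : List (List Int)) (out : Int) : Decidable (Spec_find_order_size orders out) := by unfold Spec_find_order_size; infer_instance

-- ===== CLAIM (what is proved, stated in full; the proofs are below) =====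
def Claim_equal_find_order_size : Prop := ∀ (orders : List (List Int)), Dom_find_order_size orders → Pre_find_order_size orders → Spec_find_order_size orders (find_order_size orders)

-- ===== LEMMAS AND PROOFS =====

def pvSwap (p : Int × Int) : Int × Int := (p.2, p.1)
def pvKeyP (p : Int × Int) : Int × Int := pvKey p.1 p.2

theorem pvKey_swap (p : Int × Int) : pvKeyP (pvSwap p) = pvKeyP p := by
  simp [pvKeyP, pvKey, pvSwap, min_comm, max_comm]

theorem pvKey_cases {p' p : Int × Int} (h : pvKeyP p' = pvKeyP p) : p' = p ∨ p' = pvSwap p := by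
  obtain ⟨a, b⟩ := p'; obtain ⟨v, w⟩ := p
  simp only [pvKeyP, pvKey, pvSwap, Prod.mk.injEq] at h ⊢
  omega

theorem pvGroupScan_append (l : List (Int × Int)) (q : Int × Int) :
    ∀ prev, pvGroupScan prev (l ++ [q]) =
      pvGroupScan prev l +
        (if (match l.getLast? with | some r => some r | none => prev) = some (q.2, q.1) then 1 else 0) := by
  induction l with
  | nil => intro prev; simp [pvGroupScan]
  | cons a rest ih =>
    intro prev
    obtain ⟨v, w⟩ := a
    obtain ⟨x, y⟩ := q
    simp only [List.cons_append, pvGroupScan, ih (some (v, w)), List.getLast?_cons]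
    cases h : rest.getLast? with
    | none =>
      have : rest = [] := List.getLast?_eq_none_iff.mp h
      subst this; simp; ring
    | some r => simp; ring

theorem pvGroupScan_append_none (l : List (Int × Int)) (q : Int × Int) :
    pvGroupScan none (l ++ [q]) =
      pvGroupScan none l + (if l.getLast? = some (q.2, q.1) then 1 else 0) := by
  rw [pvGroupScan_append l q none]
  cases h : l.getLast? <;> simp

theorem pv_sum_map_update {α : Type} (l : List α) (kp : α) (f g : α → Int) (δ : Int)
    (hl : l.Nodup) (hm : kp ∈ l)
    (hne : ∀ k ∈ l, k ≠ kp → f k = g k) (hk : f kp = g kp + δ) :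
    (l.map f).sum = (l.map g).sum + δ := by
  induction l with
  | nil => cases hm
  | cons a rest ih =>
    simp only [List.map_cons, List.sum_cons]
    rcases List.mem_cons.mp hm with rfl | hm'
    · have : ∀ k ∈ rest, f k = g k := by
        intro k hk'
        exact hne k (List.mem_cons_of_mem _ hk') (fun he => (List.nodup_cons.mp hl).1 (he ▸ hk'))
      rw [hk, List.map_congr_left this]
      ring
    · have ha : f a = g a := hne a (List.mem_cons_self) (fun he => (List.nodup_cons.mp hl).1 (he ▸ hm'))
      rw [ha, ih (List.nodup_cons.mp hl).2 hm' (fun k h1 h2 => hne k (List.mem_cons_of_mem _ h1) h2)]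
      ring

def pvStepA (st : PySem.Set (Int × Int) × Int) (p : Int × Int) : PySem.Set (Int × Int) × Int :=
  if PySem.Set.contains st.1 (p.2, p.1) then
    (PySem.Set.add (PySem.Set.discard st.1 (p.2, p.1)) (p.1, p.2), st.2 + 1)
  else
    (PySem.Set.add st.1 (p.1, p.2), st.2)

def pvSA (ps : List (Int × Int)) : PySem.Set (Int × Int) × Int :=
  ps.foldl pvStepA (PySem.Set.empty, 0)

def pvGrp (ps : List (Int × Int)) (k : Int × Int) : List (Int × Int) :=
  ps.filter (fun p => pvKeyP p == k)

def pvSymSpec (ps : List (Int × Int)) : Int :=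
  ((PySem.Set.ofList (ps.map pvKeyP)).map (fun k => pvGroupScan none (pvGrp ps k))).sum

theorem pvGrp_append (ps : List (Int × Int)) (p k : Int × Int) :
    pvGrp (ps ++ [p]) k = pvGrp ps k ++ if pvKeyP p = k then [p] else [] := by
  simp only [pvGrp, List.filter_append, List.filter]
  split_ifs with h
  · simp [h]
  · rw [beq_eq_false_iff_ne.mpr h]

theorem pv_symSpec_append (ps : List (Int × Int)) (p : Int × Int) :
    pvSymSpec (ps ++ [p]) =
      pvSymSpec ps + (if (pvGrp ps (pvKeyP p)).getLast? = some (pvSwap p) then 1 else 0) := by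
  have hmap : (ps ++ [p]).map pvKeyP = ps.map pvKeyP ++ [pvKeyP p] := by simp
  have hrest : ∀ k ∈ PySem.Set.ofList (ps.map pvKeyP), k ≠ pvKeyP p →
      pvGroupScan none (pvGrp (ps ++ [p]) k) = pvGroupScan none (pvGrp ps k) := by
    intro k _ hne
    rw [pvGrp_append, if_neg (fun h => hne h.symm), List.append_nil]
  by_cases hkmem : pvKeyP p ∈ ps.map pvKeyP
  · have hkm' : pvKeyP p ∈ PySem.Set.ofList (ps.map pvKeyP) := by
      rw [PySem.Set.mem_ofList]; exact hkmem
    have hofl : PySem.Set.ofList ((ps ++ [p]).map pvKeyP) = PySem.Set.ofList (ps.map pvKeyP) := by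
      rw [hmap, PySem.Set.ofList_append_singleton, PySem.Set.add_of_mem hkm']
    unfold pvSymSpec
    rw [hofl]
    exact pv_sum_map_update _ (pvKeyP p)
      (fun k => pvGroupScan none (pvGrp (ps ++ [p]) k))
      (fun k => pvGroupScan none (pvGrp ps k)) _
      (PySem.Set.nodup_ofList _) hkm'
      (fun k hk1 hk2 => hrest k hk1 hk2)
      (by
        show pvGroupScan none (pvGrp (ps ++ [p]) (pvKeyP p)) = _
        rw [pvGrp_append, if_pos rfl, pvGroupScan_append_none]
        rfl)
  · have hgrpnil : pvGrp ps (pvKeyP p) = [] := by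
      rw [pvGrp, List.filter_eq_nil_iff]
      intro q hq hbe
      exact hkmem (List.mem_map.mpr ⟨q, hq, beq_iff_eq.mp hbe⟩)
    have hofl : PySem.Set.ofList ((ps ++ [p]).map pvKeyP) =
        PySem.Set.ofList (ps.map pvKeyP) ++ [pvKeyP p] := by
      rw [hmap, PySem.Set.ofList_append_singleton, PySem.Set.add_of_not_mem]
      rw [PySem.Set.mem_ofList]
      exact hkmem
    unfold pvSymSpec
    rw [hofl, List.map_append, List.sum_append,
      List.map_congr_left (fun k hk => hrest k hk
        (fun he => hkmem (by rw [PySem.Set.mem_ofList] at hk; exact he ▸ hk)))]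
    simp [pvGrp_append, hgrpnil, pvGroupScan]

theorem pv_inv (ps : List (Int × Int)) :
    (∀ p : Int × Int, p ∈ (pvSA ps).1 ↔ (pvGrp ps (pvKeyP p)).getLast? = some p) ∧
    (pvSA ps).2 = pvSymSpec ps := by
  induction ps using List.reverseRecOn with
  | nil =>
    constructor
    · intro p; simp [pvSA, pvGrp, PySem.Set.empty]
    · simp [pvSA, pvSymSpec]
  | append_singleton ps p ih =>
    obtain ⟨ihm, ihs⟩ := ih
    have hSA : pvSA (ps ++ [p]) = pvStepA (pvSA ps) p := by
      simp [pvSA, List.foldl_append]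
    have hcon : PySem.Set.contains (pvSA ps).1 (p.2, p.1) = true ↔
        (pvGrp ps (pvKeyP p)).getLast? = some (pvSwap p) := by
      rw [PySem.Set.contains_iff]
      have := ihm (pvSwap p)
      rw [pvKey_swap] at this
      exact this
    constructor
    · intro p'
      rw [hSA, pvGrp_append]
      by_cases hk : pvKeyP p = pvKeyP p'
      · rw [if_pos hk, List.getLast?_concat]
        by_cases hc : PySem.Set.contains (pvSA ps).1 (p.2, p.1) = true
        · simp only [pvStepA, if_pos hc]
          rw [PySem.Set.mem_add, PySem.Set.mem_discard]
          constructor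
          · rintro (⟨hin, hne⟩ | rfl)
            · rcases pvKey_cases hk.symm with rfl | rfl
              · rfl
              · exact absurd rfl hne
            · rfl
          · rintro h'
            right
            rw [Option.some.injEq] at h'
            exact h'.symm
        · simp only [pvStepA, if_neg hc]
          rw [PySem.Set.mem_add]
          constructor
          · rintro (hin | rfl)
            · rcases pvKey_cases hk.symm with rfl | rfl
              · rfl
              · exact absurd ((PySem.Set.contains_iff _ _).mpr hin) hc
            · rfl
          · rintro h'
            right
            rw [Option.some.injEq] at h'
            exact h'.symm
      · rw [if_neg hk, List.append_nil]
        have hp' : p' ≠ (p.1, p.2) := by rintro rfl; exact hk rfl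
        have hp'' : p' ≠ (p.2, p.1) := by rintro rfl; exact hk (pvKey_swap p).symm
        by_cases hc : PySem.Set.contains (pvSA ps).1 (p.2, p.1) = true
        · simp only [pvStepA, if_pos hc]
          rw [PySem.Set.mem_add, PySem.Set.mem_discard, ← ihm p']
          constructor
          · rintro (⟨hin, _⟩ | rfl)
            · exact hin
            · exact absurd rfl hp'
          · intro hin; exact Or.inl ⟨hin, hp''⟩
        · simp only [pvStepA, if_neg hc]
          rw [PySem.Set.mem_add, ← ihm p']
          constructor
          · rintro (hin | rfl)
            · exact hin
            · exact absurd rfl hp'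
          · intro hin; exact Or.inl hin
    · rw [hSA, pv_symSpec_append]
      by_cases hc : PySem.Set.contains (pvSA ps).1 (p.2, p.1) = true
      · rw [if_pos (hcon.mp hc)]
        simp only [pvStepA, if_pos hc, ihs]
      · rw [if_neg (fun h => hc (hcon.mpr h))]
        simp only [pvStepA, if_neg hc, ihs]
        ring

def pvToPair (l : List Int) : Int × Int :=
  match l with | [v, w] => (v, w) | _ => (0, 0)

def pvStepB (g : PySem.Dict (Int × Int) (List (Int × Int))) (p : Int × Int) :
    PySem.Dict (Int × Int) (List (Int × Int)) :=
  g.modify (pvKeyP p) [] (· ++ [p])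

theorem pv_len2 {l : List Int} (h : l.length = 2) : ∃ v w, l = [v, w] := by
  match l, h with
  | [v, w], _ => exact ⟨v, w, rfl⟩

theorem pv_foldA (orders : List (List Int)) (h : ∀ l ∈ orders, l.length = 2) :
    ∀ st, orders.foldl
      (fun (st : PySem.Set (Int × Int) × Int) orderlist =>
        match orderlist with
        | [v, w] =>
          if PySem.Set.contains st.1 (w, v) then
            (PySem.Set.add (PySem.Set.discard st.1 (w, v)) (v, w), st.2 + 1)
          else
            (PySem.Set.add st.1 (v, w), st.2)
        | _ => st) st
    = (orders.map pvToPair).foldl pvStepA st := by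
  induction orders with
  | nil => intro st; rfl
  | cons l rest ih =>
    intro st
    obtain ⟨v, w, rfl⟩ := pv_len2 (h l List.mem_cons_self)
    simp only [List.foldl_cons, List.map_cons]
    rw [ih (fun l hl => h l (List.mem_cons_of_mem _ hl))]
    rfl

theorem pv_foldB (orders : List (List Int)) (h : ∀ l ∈ orders, l.length = 2) :
    ∀ g, orders.foldl pvGroupStep g = (orders.map pvToPair).foldl pvStepB g := by
  induction orders with
  | nil => intro g; rfl
  | cons l rest ih =>
    intro g
    obtain ⟨v, w, rfl⟩ := pv_len2 (h l List.mem_cons_self)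
    simp only [List.foldl_cons, List.map_cons]
    rw [ih (fun l hl => h l (List.mem_cons_of_mem _ hl))]
    rfl

theorem pv_groups_getD (ps : List (Int × Int)) (k : Int × Int) :
    (ps.foldl pvStepB PySem.Dict.empty).getD k [] = pvGrp ps k := by
  have h1 : ps.foldl pvStepB PySem.Dict.empty
      = (ps.map (fun p => (pvKeyP p, p))).foldl
          (fun d q => d.modify q.1 [] (· ++ [q.2])) PySem.Dict.empty := by
    rw [List.foldl_map]
    rfl
  rw [h1, PySem.Dict.getD_foldl_modify_append]
  simp [pvGrp, List.filter_map, Function.comp_def]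

theorem pv_groups_keys (ps : List (Int × Int)) :
    (ps.foldl pvStepB PySem.Dict.empty).keys = PySem.Set.ofList (ps.map pvKeyP) := by
  have h1 : ∀ (d : PySem.Dict (Int × Int) (List (Int × Int))), ps.foldl pvStepB d
      = ps.foldl (fun d x => d.modify (pvKeyP x) [] ((fun _ p => (· ++ [p])) d x)) d := by
    intro d; rfl
  rw [h1, PySem.Dict.keys_foldl_modify_key]
  simp [PySem.Set.update_nil_left]

theorem pv_alt_eq (orders : List (List Int)) (h : ∀ l ∈ orders, l.length = 2) :
    find_order_size_alt orders = (orders.length : Int) - pvSymSpec (orders.map pvToPair) := by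
  unfold find_order_size_alt
  dsimp only
  rw [pv_foldB orders h]
  set ps := orders.map pvToPair with hps
  have hnodup : (ps.foldl pvStepB PySem.Dict.empty).keys.Nodup := by
    have h1 : ∀ (d : PySem.Dict (Int × Int) (List (Int × Int))), ps.foldl pvStepB d
        = ps.foldl (fun d x => d.modify (pvKeyP x) [] ((fun _ p => (· ++ [p])) d x)) d := by
      intro d; rfl
    rw [h1]
    exact PySem.Dict.nodup_keys_foldl_modify_key _ _ _ _ _ (by simp [PySem.Dict.empty])
  rw [PySem.List.foldl_add, PySem.Dict.values_eq_map_keys _ hnodup [], pv_groups_keys,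
    List.map_map]
  unfold pvSymSpec
  have : ∀ k, pvGroupScan none ((ps.foldl pvStepB PySem.Dict.empty).getD k [])
      = pvGroupScan none (pvGrp ps k) := by
    intro k; rw [pv_groups_getD]
  simp only [Function.comp_def, pv_groups_getD]
  ring

theorem pv_main (orders : List (List Int)) (h : ∀ l ∈ orders, l.length = 2) :
    find_order_size orders = find_order_size_alt orders := by
  rw [pv_alt_eq orders h]
  unfold find_order_size
  dsimp only
  rw [pv_foldA orders h]
  have := (pv_inv (orders.map pvToPair)).2
  rw [pvSA] at this
  rw [this]

-- ===== VERDICT (by name: the statement is the Claim_ definition above) =====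
theorem find_order_size_spec : Claim_equal_find_order_size := by
  intro orders _ hpre
  unfold Spec_find_order_size
  exact pv_main orders hpre
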